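-- pv_equiv track=rewrite | github.com/lehoangbaochung/Console | ApplicationAlgorithm/src/py/unit6.py | function
-- ===== SOURCE A (Python) =====
-- def function(a):
--     r = set()
--     n = len(a)
--     a = sorted(a)
--     m = abs(a[n - 1] - a[0])
--     for i in range(1, n):
--         d = abs(a[i] - a[i - 1])
--         if d < m:
--             m = d
--     for j in range(1, n):
--         d = abs(a[j] - a[j - 1])
--         if d == m:
--             r.add((a[j], a[j -1]))
--     if abs(a[n - 1] - a[0]) == m:
--         r.add((a[n - 1], a[0]))
--     return r
-- ===== SOURCE B (Python) =====
-- def function(a):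
--     a = sorted(a)
--     groups = {}
--     groups.setdefault(abs(a[-1] - a[0]), set()).add((a[-1], a[0]))
--     for x, y in zip(a[1:], a):
--         groups.setdefault(x - y, set()).add((x, y))
--     return groups[min(groups)]
-- ===== Notes on version B (the rewrite author's own statement) =====
-- stated objective: alternative
-- what changed: Replaces A's two separate index loops over the sorted array (first find the minimum adjacent gap, then re-scan to collect the pairs achieving it, plus a trailing range-pair check) by a single grouping pass that buckets each adjacent pair under its gap in a dict seeded with the range pair, then returns the bucket of the minimum key.
import Mathlib
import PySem

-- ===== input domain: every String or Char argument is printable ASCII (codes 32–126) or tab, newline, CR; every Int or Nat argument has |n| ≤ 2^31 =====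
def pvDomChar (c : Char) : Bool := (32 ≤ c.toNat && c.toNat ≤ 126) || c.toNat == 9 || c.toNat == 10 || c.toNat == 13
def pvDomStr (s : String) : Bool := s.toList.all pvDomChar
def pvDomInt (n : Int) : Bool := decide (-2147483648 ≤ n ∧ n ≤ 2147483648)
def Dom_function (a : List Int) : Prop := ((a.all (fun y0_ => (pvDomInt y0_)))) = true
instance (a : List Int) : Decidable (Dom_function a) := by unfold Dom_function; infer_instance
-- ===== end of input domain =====

-- B replaces A's two-pass find-min-then-filter scan by one grouping pass (gap ↦ set of pairs) plus a min-key lookup; same return value (a set), alternative decomposition, same asymptotic cost.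

-- ===== PORT A =====
def function (a : List Int) : List (Int × Int) :=
  let n : Int := a.length
  let s := PySem.List.sorted a (fun x => x) false
  let r : PySem.Set (Int × Int) := PySem.Set.empty
  let m : Int := |PySem.List.pyGetD s (n - 1) 0 - PySem.List.pyGetD s 0 0|
  let m := (PySem.List.pyRange 1 n 1).foldl (fun m i =>
    let d := |PySem.List.pyGetD s i 0 - PySem.List.pyGetD s (i - 1) 0|
    if d < m then d else m) m
  let r := (PySem.List.pyRange 1 n 1).foldl (fun r j =>
    let d := |PySem.List.pyGetD s j 0 - PySem.List.pyGetD s (j - 1) 0|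
    if d = m then PySem.Set.add r (PySem.List.pyGetD s j 0, PySem.List.pyGetD s (j - 1) 0) else r) r
  if |PySem.List.pyGetD s (n - 1) 0 - PySem.List.pyGetD s 0 0| = m then
    PySem.Set.add r (PySem.List.pyGetD s (n - 1) 0, PySem.List.pyGetD s 0 0)
  else r

-- ===== PORT B =====
-- a[1:] is ported as s.drop 1 (exact: PySem.List.slice_from_one); zip is List.zip;
-- groups.setdefault(k, set()).add(p) is Dict.modify with default Set.empty.
def function_alt (a : List Int) : List (Int × Int) :=
  let s := PySem.List.sorted a (fun x => x) false
  let q := (PySem.List.pyGetD s (-1) 0, PySem.List.pyGetD s 0 0)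
  let g : PySem.Dict Int (PySem.Set (Int × Int)) :=
    PySem.Dict.modify PySem.Dict.empty |q.1 - q.2| PySem.Set.empty (fun t => PySem.Set.add t q)
  let g := ((s.drop 1).zip s).foldl
    (fun g p => PySem.Dict.modify g (p.1 - p.2) PySem.Set.empty (fun t => PySem.Set.add t p)) g
  match PySem.List.min? (PySem.Dict.keys g) (fun k => k) with
  | some k => PySem.Dict.getD g k PySem.Set.empty
  | none => PySem.Set.empty

-- ===== PRECONDITION & SPEC =====
-- Pre_ excludes only the empty list, on which A (a[n-1]) — and B alike — raises IndexError.
def Pre_function (a : List Int) : Prop := a ≠ []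
instance (a : List Int) : Decidable (Pre_function a) := by unfold Pre_function; infer_instance
def pvWitness_function : List Int := [3, 1, 7, 2]

def Spec_function (a : List Int) (out : List (Int × Int)) : Prop := out = function_alt a
instance (a : List Int) (out : List (Int × Int)) : Decidable (Spec_function a out) := by unfold Spec_function; infer_instance

-- ===== CLAIM (what is proved, stated in full; the proofs are below) =====
def Claim_equal_function : Prop := ∀ (a : List Int), Dom_function a → Pre_function a → Spec_function a (function a)

-- ===== LEMMAS AND PROOFS =====

-- the adjacent pairs (s[i], s[i-1]) of a list, as both ports traverse them
def pvGap (p : Int × Int) : Int := p.1 - p.2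

-- A's index loop over range(1, n) visits exactly the adjacent pairs (s.drop 1).zip s
theorem pv_range_map_eq_zip (s : List Int) :
    (PySem.List.pyRange 1 (s.length : Int) 1).map
      (fun i => (PySem.List.pyGetD s i 0, PySem.List.pyGetD s (i - 1) 0))
    = (s.drop 1).zip s := by
  apply List.ext_getElem
  · simp [PySem.List.length_pyRange_one]
  · intro k h1 h2
    have hk : k + 1 < s.length := by
      simp [PySem.List.length_pyRange_one] at h1
      omega
    simp only [List.getElem_map, PySem.List.getElem_pyRange_one, List.getElem_zip,
      List.getElem_drop]
    have h1k' : (1 : Int) + (k : Int) - 1 = ((k : Nat) : Int) := by omega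
    have h1k : (1 : Int) + (k : Int) = ((k + 1 : Nat) : Int) := by push_cast; ring
    rw [h1k', h1k, PySem.List.pyGetD_natCast, PySem.List.pyGetD_natCast,
      List.getD_eq_getElem _ _ hk, List.getD_eq_getElem _ _ (by omega : k < s.length)]
    simp [Nat.add_comm]


theorem pv_range_foldl {β : Type} (s : List Int) (g : β → (Int × Int) → β) (init : β) :
    (PySem.List.pyRange 1 (s.length : Int) 1).foldl
      (fun b i => g b (PySem.List.pyGetD s i 0, PySem.List.pyGetD s (i - 1) 0)) init
    = ((s.drop 1).zip s).foldl g init := by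
  rw [← pv_range_map_eq_zip s, List.foldl_map]

-- sortedness: every adjacent pair is (larger, smaller)
theorem pv_adj_le (s : List Int) (h : s.Pairwise (· ≤ ·)) :
    ∀ p ∈ (s.drop 1).zip s, p.2 ≤ p.1 := by
  induction s with
  | nil => intro p hp; simp at hp
  | cons x t ih =>
    cases t with
    | nil => intro p hp; simp at hp
    | cons z t' =>
      intro p hp
      have hzip : ((x :: z :: t').drop 1).zip (x :: z :: t')
          = (z, x) :: (((z :: t').drop 1).zip (z :: t')) := rfl
      rw [hzip] at hp
      rcases List.mem_cons.mp hp with rfl | hp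
      · exact (List.pairwise_cons.mp h).1 z List.mem_cons_self
      · exact ih (List.pairwise_cons.mp h).2 p hp

-- head is minimal in a Pairwise-(≤) list
theorem pv_head_le (s : List Int) (h : s.Pairwise (· ≤ ·)) :
    ∀ y ∈ s, s.getD 0 0 ≤ y := by
  cases s with
  | nil => intro y hy; cases hy
  | cons x t =>
    intro y hy
    rcases List.mem_cons.mp hy with rfl | hy
    · simp
    · simpa using (List.pairwise_cons.mp h).1 y hy

-- last is maximal in a Pairwise-(≤) list
theorem pv_le_last (s : List Int) (h : s.Pairwise (· ≤ ·)) :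
    ∀ y ∈ s, y ≤ s.getD (s.length - 1) 0 := by
  induction s with
  | nil => intro y hy; cases hy
  | cons x t ih =>
    intro y hy
    cases t with
    | nil => simp at hy; simp [hy]
    | cons z t' =>
      have hlast : (x :: z :: t').getD ((x :: z :: t').length - 1) 0
          = (z :: t').getD ((z :: t').length - 1) 0 := by
        simp [List.getD]
        rfl
      have hx : ∀ w ∈ z :: t', x ≤ w := (List.pairwise_cons.mp h).1
      have hpw' : (z :: t').Pairwise (· ≤ ·) := (List.pairwise_cons.mp h).2
      have hmem : (z :: t').getD ((z :: t').length - 1) 0 ∈ (z :: t') := by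
        rw [List.getD_eq_getElem _ _ (by simp)]
        exact List.getElem_mem _
      rcases List.mem_cons.mp hy with rfl | hy
      · rw [hlast]; exact hx _ hmem
      · rw [hlast]; exact ih hpw' y hy

-- folded min facts
theorem pv_foldl_min_le_init (l : List Int) (d : Int) : l.foldl min d ≤ d := by
  induction l generalizing d with
  | nil => exact le_refl d
  | cons x t ih => exact le_trans (ih (min d x)) (min_le_left d x)

theorem pv_foldl_min_le_mem (l : List Int) (d g : Int) (h : g ∈ l) : l.foldl min d ≤ g := by
  induction l generalizing d with
  | nil => cases h
  | cons x t ih =>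
    rcases List.mem_cons.mp h with rfl | hg
    · exact le_trans (pv_foldl_min_le_init t (min d g)) (min_le_right d g)
    · exact ih (min d x) hg

theorem pv_foldl_min_mem (l : List Int) (d : Int) : l.foldl min d = d ∨ l.foldl min d ∈ l := by
  induction l generalizing d with
  | nil => exact Or.inl rfl
  | cons x t ih =>
    rcases ih (min d x) with h | h
    · rcases min_cases d x with ⟨h2, _⟩ | ⟨h2, _⟩
      · exact Or.inl (by rw [List.foldl_cons, h, h2])
      · refine Or.inr ?_
        rw [List.foldl_cons, h, h2]
        exact List.mem_cons_self
    · exact Or.inr (List.mem_cons_of_mem x h)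

-- bucket content of B's grouping fold
theorem pv_getD_foldl_modify (l : List (Int × Int)) (d : PySem.Dict Int (PySem.Set (Int × Int))) (c : Int) :
    (l.foldl (fun d p => d.modify (p.1 - p.2) PySem.Set.empty (fun t => PySem.Set.add t p)) d).getD c PySem.Set.empty
    = PySem.Set.update (d.getD c PySem.Set.empty) (l.filter (fun p => decide (p.1 - p.2 = c))) := by
  induction l generalizing d with
  | nil => simp [PySem.Set.update]
  | cons p l ih =>
    rw [List.foldl_cons, ih]
    by_cases hc : p.1 - p.2 = c
    · rw [List.filter_cons_of_pos (by simpa using hc)]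
      rw [PySem.Set.update_cons]
      congr 1
      rw [PySem.Dict.getD_modify, if_pos hc.symm, hc]
    · rw [List.filter_cons_of_neg (by simpa using hc)]
      congr 1
      rw [PySem.Dict.getD_modify, if_neg (fun h' => hc h'.symm)]

-- collapsing a filter all of whose elements are q
theorem pv_ofList_allq (F : List (Int × Int)) (q : Int × Int) (h : ∀ p ∈ F, p = q) :
    PySem.Set.add (PySem.Set.ofList F) q = [q] := by
  induction F with
  | nil =>
    rw [PySem.Set.add_of_not_mem (by simp [PySem.Set.ofList])]
    simp [PySem.Set.ofList]
  | cons p F' ih =>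
    have hpq : p = q := h p List.mem_cons_self
    subst hpq
    have hdis : (PySem.Set.ofList F').discard p = [] := by
      rw [List.eq_nil_iff_forall_not_mem]
      intro y hy
      rcases (PySem.Set.mem_discard _ _ _).mp hy with ⟨hy1, hy2⟩
      exact hy2 (h y (List.mem_cons_of_mem _ ((PySem.Set.mem_ofList _ _).mp hy1)))
    rw [PySem.Set.ofList_cons, hdis]
    exact PySem.Set.add_of_mem List.mem_cons_self

theorem pv_update_allq (F : List (Int × Int)) (q : Int × Int) (h : ∀ p ∈ F, p = q) :
    PySem.Set.update [q] F = [q] := by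
  induction F with
  | nil => rfl
  | cons p F' ih =>
    have hpq : p = q := h p List.mem_cons_self
    subst hpq
    rw [PySem.Set.update_cons, PySem.Set.add_of_mem List.mem_cons_self]
    exact ih (fun r hr => h r (List.mem_cons_of_mem _ hr))

-- proof-side copies of the two port bodies after the sort (definitionally equal to the ports)
def pvA (n : Int) (s : List Int) : List (Int × Int) :=
  let m : Int := |PySem.List.pyGetD s (n - 1) 0 - PySem.List.pyGetD s 0 0|
  let m := (PySem.List.pyRange 1 n 1).foldl (fun m i =>
    let d := |PySem.List.pyGetD s i 0 - PySem.List.pyGetD s (i - 1) 0|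
    if d < m then d else m) m
  let r := (PySem.List.pyRange 1 n 1).foldl (fun r j =>
    let d := |PySem.List.pyGetD s j 0 - PySem.List.pyGetD s (j - 1) 0|
    if d = m then PySem.Set.add r (PySem.List.pyGetD s j 0, PySem.List.pyGetD s (j - 1) 0) else r)
    (PySem.Set.empty)
  if |PySem.List.pyGetD s (n - 1) 0 - PySem.List.pyGetD s 0 0| = m then
    PySem.Set.add r (PySem.List.pyGetD s (n - 1) 0, PySem.List.pyGetD s 0 0)
  else r

def pvB (s : List Int) : List (Int × Int) :=
  let q := (PySem.List.pyGetD s (-1) 0, PySem.List.pyGetD s 0 0)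
  let g : PySem.Dict Int (PySem.Set (Int × Int)) :=
    PySem.Dict.modify PySem.Dict.empty |q.1 - q.2| PySem.Set.empty (fun t => PySem.Set.add t q)
  let g := ((s.drop 1).zip s).foldl
    (fun g p => PySem.Dict.modify g (p.1 - p.2) PySem.Set.empty (fun t => PySem.Set.add t p)) g
  match PySem.List.min? (PySem.Dict.keys g) (fun k => k) with
  | some k => PySem.Dict.getD g k PySem.Set.empty
  | none => PySem.Set.empty

theorem pv_function_eq_pvA (a : List Int) :
    function a = pvA (a.length : Int) (PySem.List.sorted a (fun x => x) false) := rfl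

theorem pv_function_alt_eq_pvB (a : List Int) :
    function_alt a = pvB (PySem.List.sorted a (fun x => x) false) := rfl

theorem pv_main (s : List Int) (hpw : s.Pairwise (· ≤ ·)) (hsne : s ≠ []) :
    pvA (s.length : Int) s = pvB s := by
  have hpos : 0 < s.length := List.length_pos_iff.mpr hsne
  set H := s.getD 0 0 with hH
  set L := s.getD (s.length - 1) 0 with hL
  have hLmem : L ∈ s := by
    rw [hL, List.getD_eq_getElem _ _ (by omega)]; exact List.getElem_mem _
  have hHL : H ≤ L := pv_head_le s hpw L hLmem
  have e1 : PySem.List.pyGetD s ((s.length : Int) - 1) 0 = L := by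
    have hc : ((s.length : Int) - 1) = ((s.length - 1 : Nat) : Int) := by omega
    rw [hc, PySem.List.pyGetD_natCast]
  have e0 : PySem.List.pyGetD s 0 0 = H := by rw [PySem.List.pyGetD_zero]
  have em1 : PySem.List.pyGetD s (-1) 0 = L := by
    rw [PySem.List.pyGetD_neg_one _ _ hsne, hL, List.getLast_eq_getElem,
      List.getD_eq_getElem _ _ (by omega)]
  have habs : |L - H| = L - H := abs_of_nonneg (by omega)
  simp only [pvA, pvB, e1, e0, em1, habs]
  -- name the adjacent pairs and the minimum gap
  set P := (s.drop 1).zip s with hP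
  have hadj : ∀ p ∈ P, p.2 ≤ p.1 := pv_adj_le s hpw
  set m := (P.map (fun p => p.1 - p.2)).foldl min (L - H) with hm
  -- A's first loop computes m
  have hA1 : (PySem.List.pyRange 1 (s.length : Int) 1).foldl (fun m i =>
      let d := |PySem.List.pyGetD s i 0 - PySem.List.pyGetD s (i - 1) 0|
      if d < m then d else m) (L - H) = m := by
    have t1 := pv_range_foldl s
      (fun (m : Int) (p : Int × Int) => if |p.1 - p.2| < m then |p.1 - p.2| else m) (L - H)
    have t2 : P.foldl (fun (m : Int) p => if |p.1 - p.2| < m then |p.1 - p.2| else m) (L - H)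
        = P.foldl (fun (m : Int) p => min m (p.1 - p.2)) (L - H) := by
      refine PySem.List.foldl_congr_mem _ _ _ _ ?_
      intro acc p hp
      have h21 := hadj p hp
      rw [abs_of_nonneg (by omega), min_def]
      split_ifs <;> omega
    have t3 : P.foldl (fun (m : Int) p => min m (p.1 - p.2)) (L - H) = m := by
      rw [hm, List.foldl_map]
    exact t1.trans (t2.trans t3)
  -- A's second loop collects the filter
  have hA2 : (PySem.List.pyRange 1 (s.length : Int) 1).foldl (fun r j =>
      let d := |PySem.List.pyGetD s j 0 - PySem.List.pyGetD s (j - 1) 0|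
      if d = m then PySem.Set.add r (PySem.List.pyGetD s j 0, PySem.List.pyGetD s (j - 1) 0) else r)
      PySem.Set.empty
      = PySem.Set.ofList (P.filter (fun p => decide (p.1 - p.2 = m))) := by
    have t1 := pv_range_foldl s
      (fun (r : PySem.Set (Int × Int)) (p : Int × Int) =>
        if |p.1 - p.2| = m then PySem.Set.add r (p.1, p.2) else r) PySem.Set.empty
    have t2 : P.foldl (fun (r : PySem.Set (Int × Int)) p =>
        if |p.1 - p.2| = m then PySem.Set.add r (p.1, p.2) else r) PySem.Set.empty
        = P.foldl (fun (r : PySem.Set (Int × Int)) p =>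
        if p.1 - p.2 = m then PySem.Set.add r p else r) PySem.Set.empty := by
      refine PySem.List.foldl_congr_mem _ _ _ _ ?_
      intro acc p hp
      have h21 := hadj p hp
      rw [abs_of_nonneg (by omega)]
    have t3 : P.foldl (fun (r : PySem.Set (Int × Int)) p =>
        if p.1 - p.2 = m then PySem.Set.add r p else r) PySem.Set.empty
        = PySem.Set.ofList (P.filter (fun p => decide (p.1 - p.2 = m))) := by
      rw [PySem.List.foldl_ite_eq_foldl_filter]
      exact (PySem.Set.ofList_eq_foldl _).symm
    exact t1.trans (t2.trans t3)
  rw [hA1, hA2]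
  -- B's dict: bucket contents and key set
  set F := P.filter (fun p => decide (p.1 - p.2 = m)) with hF
  set d0 : PySem.Dict Int (PySem.Set (Int × Int)) :=
    PySem.Dict.modify PySem.Dict.empty (L - H) PySem.Set.empty
      (fun t => PySem.Set.add t (L, H)) with hd0
  have hkeys : (P.foldl (fun g p =>
      PySem.Dict.modify g (p.1 - p.2) PySem.Set.empty (fun t => PySem.Set.add t p)) d0).keys
      = PySem.Set.update d0.keys (P.map (fun p => p.1 - p.2)) :=
    PySem.Dict.keys_foldl_modify_key P (fun p => p.1 - p.2) PySem.Set.empty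
      (fun _ p => fun t => PySem.Set.add t p) d0
  have hd0keys : d0.keys = [L - H] := rfl
  -- the minimum key is m
  have hmmem : m = L - H ∨ m ∈ P.map (fun p => p.1 - p.2) := pv_foldl_min_mem _ _
  have hmin : PySem.List.min? ((P.foldl (fun g p =>
      PySem.Dict.modify g (p.1 - p.2) PySem.Set.empty (fun t => PySem.Set.add t p)) d0).keys)
      (fun k => k) = some m := by
    rw [hkeys, hd0keys]
    cases hmq : PySem.List.min? (PySem.Set.update [L - H] (P.map (fun p => p.1 - p.2)))
        (fun k => k) with
    | none =>
      exfalso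
      have := (PySem.List.min?_eq_none_iff _ _).mp hmq
      have hin : (L - H) ∈ PySem.Set.update [L - H] (P.map (fun p => p.1 - p.2)) :=
        (PySem.Set.mem_update _ _ _).mpr (Or.inl (List.mem_cons_self))
      rw [this] at hin
      cases hin
    | some k =>
      congr 1
      have hk1 : m ≤ k := by
        rcases (PySem.Set.mem_update _ _ _).mp (PySem.List.min?_mem hmq) with hk | hk
        · rcases List.mem_singleton.mp hk with rfl
          exact pv_foldl_min_le_init _ _
        · exact pv_foldl_min_le_mem _ _ _ hk
      have hk2 : k ≤ m := by
        refine PySem.List.min?_isMin hmq m ?_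
        refine (PySem.Set.mem_update _ _ _).mpr ?_
        rcases hmmem with h | h
        · exact Or.inl (h ▸ List.mem_cons_self)
        · exact Or.inr h
      omega
  simp only [hmin]
  rw [pv_getD_foldl_modify, ← hF]
  -- the seeded bucket at key m
  by_cases hD : L - H = m
  · -- the range pair lands in the minimum bucket: every extracted pair equals it
    have hallq : ∀ p ∈ F, p = (L, H) := by
      intro p hp
      rcases List.mem_filter.mp hp with ⟨hp1, hp2⟩
      have hgap : p.1 - p.2 = L - H := by
        have := of_decide_eq_true hp2
        omega
      obtain ⟨p1, p2⟩ := p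
      have hz := List.of_mem_zip hp1
      have hp1s : p1 ∈ s := List.mem_of_mem_drop hz.1
      have hp2s : p2 ∈ s := hz.2
      have h1 := pv_le_last s hpw p1 hp1s
      have h2 := pv_head_le s hpw p2 hp2s
      simp only at hgap
      have : p1 = L ∧ p2 = H := by constructor <;> omega
      rw [this.1, this.2]
    have hbucket : d0.getD m PySem.Set.empty = [(L, H)] := by
      rw [hd0, PySem.Dict.getD_modify, if_pos hD.symm, PySem.Dict.getD_empty]
      exact PySem.Set.add_of_not_mem (by simp [PySem.Set.empty])
    rw [if_pos hD, hbucket, pv_update_allq F (L, H) hallq, pv_ofList_allq F (L, H) hallq]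
  · have hbucket : d0.getD m PySem.Set.empty = PySem.Set.empty := by
      rw [hd0, PySem.Dict.getD_modify, if_neg (fun h => hD h.symm), PySem.Dict.getD_empty]
    rw [if_neg hD, hbucket]
    exact PySem.Set.update_nil_left F

-- ===== VERDICT (by name: the statement is the Claim_ definition above) =====
theorem function_spec : Claim_equal_function := by
  intro a _ ha
  unfold Spec_function
  rw [pv_function_eq_pvA, pv_function_alt_eq_pvB,
    show ((a.length : Nat) : Int) = (((PySem.List.sorted a (fun x => x) false).length : Nat) : Int) by
      rw [PySem.List.length_sorted]]
  exact pv_main _ (PySem.List.sorted_pairwise a (fun x => x))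
    (by rw [Ne, PySem.List.sorted_eq_nil_iff]; exact ha)
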